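-- pv_equiv track=rewrite | github.com/hadirayy/Superior-University | Superior University/Semester  03/AI Lab/Lab 07/Lab 07.py | A_staric
-- ===== SOURCE A (Python) =====
-- graph = {
--     'A': {'B': 2, 'C': 4},
--     'B': {'C': 1, 'D': 5},
--     'C': {'D': 3},
--     'D': {}
-- }
--
-- h = {
--     'A': 7,
--     'B': 6,
--     'C': 2,
--     'D': 0
-- }
--
-- def A_staric(start, goal):
--     list = [start]
--     g = {start: 0}
--     parent= {start: None}
--
--     while list:
--         current = min(list, key=lambda node: g[node] + h[node])
--         if current == goal:
--             return path(parent, goal)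
--
--         list.remove(current)
--
--         for neighbor in graph[current]:
--             new_g = g[current] + graph[current][neighbor]
--
--             if neighbor not in g or new_g < g[neighbor]:
--                 g[neighbor] = new_g
--                 parent[neighbor] = current
--                 if neighbor not in list:
--                     list.append(neighbor)
--
-- def path(parent, node):
--     path = []
--     while node:
--         path.append(node)
--         node = parent[node]
--     return path[::-1]
-- ===== SOURCE B (Python) =====
-- graph = {
--     'A': {'B': 2, 'C': 4},
--     'B': {'C': 1, 'D': 5},
--     'C': {'D': 3},
--     'D': {}
-- }
--
-- h = {
--     'A': 7,
--     'B': 6,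
--     'C': 2,
--     'D': 0
-- }
--
-- def _best(node, goal):
--     # returns (cost, path) of the cheapest node->goal path, or None (graph is a DAG)
--     if node == goal:
--         return (0, [node])
--     res = None
--     for nb, w in graph[node].items():
--         sub = _best(nb, goal)
--         if sub is not None and (res is None or w + sub[0] < res[0]):
--             res = (w + sub[0], [node] + sub[1])
--     return res
--
-- def A_staric(start, goal):
--     best = _best(start, goal)
--     return None if best is None else best[1]
-- ===== Notes on version B (the rewrite author's own statement) =====
-- stated objective: alternative
-- what changed: Replaced the iterative A* open-list loop (min-scan over a frontier with g/parent dicts and backward path reconstruction) by a direct recursive cheapest-path search over the acyclic graph that builds the path front-to-back.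
-- intended difference: For start='A' with goal 'C' or 'D' A's inadmissible heuristic (h['A']=7, h['B']=6 overestimate the true distances) makes it return the suboptimal paths ['A','C'] and ['A','C','D'], while B returns the true shortest paths ['A','B','C'] and ['A','B','C','D'], which is what an A* shortest-path routine is meant to produce. — e.g. on A_staric("A", "C"): A returns some ["A", "C"], B returns some ["A", "B", "C"]
import Mathlib
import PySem

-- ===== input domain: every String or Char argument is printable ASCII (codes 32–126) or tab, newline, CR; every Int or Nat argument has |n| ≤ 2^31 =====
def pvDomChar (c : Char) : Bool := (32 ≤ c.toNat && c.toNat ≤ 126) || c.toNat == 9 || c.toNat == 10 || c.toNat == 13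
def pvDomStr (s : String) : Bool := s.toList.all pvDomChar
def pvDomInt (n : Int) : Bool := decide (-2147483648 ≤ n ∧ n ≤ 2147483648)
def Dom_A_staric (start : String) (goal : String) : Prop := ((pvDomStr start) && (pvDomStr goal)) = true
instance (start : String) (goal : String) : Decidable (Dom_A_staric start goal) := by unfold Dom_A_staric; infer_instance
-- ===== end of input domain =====

-- B replaces A's iterative A* open-list loop by a recursive cheapest-path search on the
-- (acyclic) fixed graph; on start='A', goal∈{'C','D'} A's inadmissible heuristic returns a
-- suboptimal path and B returns the true shortest path (stated as D_ below).


-- ===== PORT A =====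
-- module-level dicts `graph` and `h`
def pvGraph : PySem.Dict String (PySem.Dict String Int) :=
  PySem.Dict.ofList
    [("A", PySem.Dict.ofList [("B", 2), ("C", 4)]),
     ("B", PySem.Dict.ofList [("C", 1), ("D", 5)]),
     ("C", PySem.Dict.ofList [("D", 3)]),
     ("D", PySem.Dict.ofList [])]

def pvH : PySem.Dict String Int :=
  PySem.Dict.ofList [("A", 7), ("B", 6), ("C", 2), ("D", 0)]

-- helper `path`: `while node: path.append(node); node = parent[node]`; the final
-- `path[::-1]` is the .reverse applied by the caller.  (Keys looked up are always present
-- inside A's use; `.getD` is exact there.)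
def pvPathLoop : Nat → PySem.Dict String (Option String) → Option String → List String → List String
  | 0, _, _, acc => acc
  | f + 1, par, node, acc =>
    match node with
    | none => acc
    | some s => if s = "" then acc else pvPathLoop f par (par.getD s none) (acc ++ [s])

-- the body of A's `for neighbor in graph[current]:` loop, threading (list, g, parent)
def pvStep (current : String)
    (st : List String × PySem.Dict String Int × PySem.Dict String (Option String))
    (neighbor : String) :
    List String × PySem.Dict String Int × PySem.Dict String (Option String) :=
  let l := st.1
  let g := st.2.1
  let parent := st.2.2
  let new_g := g.getD current 0 + (pvGraph.getD current (PySem.Dict.ofList [])).getD neighbor 0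
  if g.get? neighbor = none ∨ new_g < g.getD neighbor 0 then
    let g := g.insert neighbor new_g
    let parent := parent.insert neighbor (some current)
    let l := if neighbor ∈ l then l else l ++ [neighbor]
    (l, g, parent)
  else (l, g, parent)

-- the `while list:` loop of A; fuel only makes the recursion total (never exhausted on
-- the fixed 4-node graph within Pre_)
def pvALoop : Nat → List String → PySem.Dict String Int → PySem.Dict String (Option String) → String → Option (List String)
  | 0, _, _, _, _ => none
  | f + 1, lst, g, parent, goal =>
    match PySem.List.min? lst (fun node => g.getD node 0 + pvH.getD node 0) with
    | none => none   -- list empty: Python falls off the loop and returns None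
    | some current =>
      if current = goal then some ((pvPathLoop 10 parent (some goal) []).reverse)
      else
        let lst1 := (PySem.List.remove? lst current).getD lst
        let st := ((pvGraph.getD current (PySem.Dict.ofList [])).keys).foldl
            (pvStep current) (lst1, g, parent)
        pvALoop f st.1 st.2.1 st.2.2 goal

def A_staric (start : String) (goal : String) : Option (List String) :=
  pvALoop 12 [start] (PySem.Dict.ofList [(start, 0)])
    (PySem.Dict.ofList [(start, (none : Option String))]) goal

-- ===== PORT B =====
-- B's view of the module-level `graph` (adjacency items); unknown node → [] (KeyError in
-- Python, outside Pre_)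
def pvAdjB (node : String) : List (String × Int) :=
  if node = "A" then [("B", 2), ("C", 4)]
  else if node = "B" then [("C", 1), ("D", 5)]
  else if node = "C" then [("D", 3)]
  else []

-- `_best`: cheapest node→goal (cost, path); fuel 5 exceeds the DAG depth (4), so it is
-- never exhausted
def pvBest : Nat → String → String → Option (Int × List String)
  | 0, _, _ => none
  | f + 1, node, goal =>
    if node = goal then some (0, [node])
    else
      (pvAdjB node).foldl
        (fun res p =>
          match pvBest f p.1 goal, res with
          | some s, none => some (p.2 + s.1, node :: s.2)
          | some s, some r =>
            if p.2 + s.1 < r.1 then some (p.2 + s.1, node :: s.2) else some r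
          | none, r => r)
        none

def A_staric_alt (start : String) (goal : String) : Option (List String) :=
  (pvBest 5 start goal).map (·.2)

-- ===== PRECONDITION & SPEC =====
-- A raises KeyError (h[start] inside min's key) when start is not a graph node
def Pre_A_staric (start : String) (goal : String) : Prop :=
  start = "A" ∨ start = "B" ∨ start = "C" ∨ start = "D"
instance (start : String) (goal : String) : Decidable (Pre_A_staric start goal) := by
  unfold Pre_A_staric; infer_instance
def pvWitness_A_staric : String × String := ("B", "D")

-- For start='A' with goal 'C' or 'D', A's inadmissible heuristic (h['A']=7, h['B']=6
-- overestimate true distances) makes it return the suboptimal ['A','C'] / ['A','C','D'],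
-- while B returns the true shortest ['A','B','C'] / ['A','B','C','D'], the intended
-- output of a shortest-path routine.
def D_A_staric (start : String) (goal : String) : Prop :=
  start = "A" ∧ (goal = "C" ∨ goal = "D")
instance (start : String) (goal : String) : Decidable (D_A_staric start goal) := by
  unfold D_A_staric; infer_instance

def Spec_A_staric (start : String) (goal : String) (out : Option (List String)) : Prop :=
  ¬ D_A_staric start goal → out = A_staric_alt start goal
instance (start : String) (goal : String) (out : Option (List String)) :
    Decidable (Spec_A_staric start goal out) := by unfold Spec_A_staric; infer_instance

def pvDiffWitness_A_staric : String × String := ("A", "C")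
def pvDiffWitnessOut_A_staric : (Option (List String)) × (Option (List String)) :=
  (some ["A", "C"], some ["A", "B", "C"])

-- ===== CLAIM (what is proved, stated in full; the proofs are below) =====
def Claim_unchanged_A_staric : Prop := ∀ (start : String) (goal : String), Dom_A_staric start goal → Pre_A_staric start goal → Spec_A_staric start goal (A_staric start goal)
def Claim_changed_A_staric : Prop := Dom_A_staric (pvDiffWitness_A_staric.1) (pvDiffWitness_A_staric.2) ∧ Pre_A_staric (pvDiffWitness_A_staric.1) (pvDiffWitness_A_staric.2) ∧ D_A_staric (pvDiffWitness_A_staric.1) (pvDiffWitness_A_staric.2) ∧ A_staric (pvDiffWitness_A_staric.1) (pvDiffWitness_A_staric.2) = pvDiffWitnessOut_A_staric.1 ∧ A_staric_alt (pvDiffWitness_A_staric.1) (pvDiffWitness_A_staric.2) = pvDiffWitnessOut_A_staric.2 ∧ pvDiffWitnessOut_A_staric.1 ≠ pvDiffWitnessOut_A_staric.2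
def Claim_exact_A_staric : Prop := ∀ (start : String) (goal : String), Dom_A_staric start goal → Pre_A_staric start goal → D_A_staric start goal → A_staric start goal ≠ A_staric_alt start goal

-- ===== LEMMAS AND PROOFS =====

-- the four graph nodes
def pvNodes : List String := ["A", "B", "C", "D"]

-- one step of the neighbor loop either keeps the open list or appends the neighbor
theorem pvStep_fst (current : String)
    (st : List String × PySem.Dict String Int × PySem.Dict String (Option String))
    (neighbor : String) :
    (pvStep current st neighbor).1 = st.1 ∨ (pvStep current st neighbor).1 = st.1 ++ [neighbor] := by
  simp only [pvStep]
  split_ifs <;> simp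

-- folding the neighbor loop over nodes keeps the open list inside pvNodes
theorem pvFold_mem (current : String) (neighbors : List String)
    (hn : ∀ x ∈ neighbors, x ∈ pvNodes) :
    ∀ st : List String × PySem.Dict String Int × PySem.Dict String (Option String),
      (∀ x ∈ st.1, x ∈ pvNodes) →
      ∀ x ∈ (neighbors.foldl (pvStep current) st).1, x ∈ pvNodes := by
  induction neighbors with
  | nil => intro st hst x hx; exact hst x hx
  | cons n t ih =>
    intro st hst x hx
    refine ih (fun y hy => hn y (List.mem_cons_of_mem _ hy)) (pvStep current st n) ?_ x hx
    intro y hy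
    rcases pvStep_fst current st n with h | h
    · exact hst y (h ▸ hy)
    · rw [h] at hy
      rcases List.mem_append.mp hy with hy | hy
      · exact hst y hy
      · rw [List.mem_singleton.mp hy]
        exact hn n List.mem_cons_self

-- neighbors of a node are nodes
theorem pvAdj_mem (current : String) (hc : current ∈ pvNodes) :
    ∀ x ∈ (pvGraph.getD current (PySem.Dict.ofList [])).keys, x ∈ pvNodes := by
  fin_cases hc <;> decide

-- if the goal is not a graph node, A's loop never returns a path
theorem pvALoop_none (g : String) (kg : g ∉ pvNodes) :
    ∀ (f : Nat) (lst : List String) (gd : PySem.Dict String Int)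
      (par : PySem.Dict String (Option String)),
      (∀ x ∈ lst, x ∈ pvNodes) → pvALoop f lst gd par g = none := by
  intro f
  induction f with
  | zero => intro lst gd par _; rfl
  | succ f ih =>
    intro lst gd par hl
    unfold pvALoop
    cases hmin : PySem.List.min? lst (fun node => gd.getD node 0 + pvH.getD node 0) with
    | none => rfl
    | some current =>
      have hc : current ∈ pvNodes := hl current (PySem.List.min?_mem hmin)
      have hne : ¬ current = g := fun h => kg (h ▸ hc)
      simp only [hne, if_false]
      apply ih
      apply pvFold_mem current _ (pvAdj_mem current hc)
      intro x hx
      cases hrem : PySem.List.remove? lst current with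
      | none => exact hl x (by simpa [hrem] using hx)
      | some l' =>
        have : l' = lst.erase current := by
          have := PySem.List.remove?_eq_some_erase (PySem.List.min?_mem hmin) (xs := lst) (v := current)
          rw [hrem] at this; exact (Option.some.inj this)
        exact hl x (List.mem_of_mem_erase (by simpa [hrem, this] using hx))

-- if the goal is not a graph node, B's search never finds it
theorem pvBest_none (g : String) (kg : g ∉ pvNodes) :
    ∀ (f : Nat) (node : String), node ∈ pvNodes → pvBest f node g = none := by
  intro f
  induction f with
  | zero => intro node _; rfl
  | succ f ih =>
    intro node hn
    have hne : ¬ node = g := fun h => kg (h ▸ hn)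
    fin_cases hn <;>
      simp [pvBest, pvAdjB, hne, ih "B" (by decide), ih "C" (by decide), ih "D" (by decide)]

-- ===== VERDICT (by name: the statement is the Claim_ definition above) =====
theorem A_staric_spec : Claim_unchanged_A_staric := by
  intro s g _ hpre
  unfold Spec_A_staric
  intro hnd
  by_cases h1 : g = "A"
  · subst h1; rcases hpre with h | h | h | h <;> subst h <;> decide
  by_cases h2 : g = "B"
  · subst h2; rcases hpre with h | h | h | h <;> subst h <;> decide
  by_cases h3 : g = "C"
  · subst h3
    rcases hpre with h | h | h | h <;> subst h
    · exact absurd (by decide) hnd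
    all_goals decide
  by_cases h4 : g = "D"
  · subst h4
    rcases hpre with h | h | h | h <;> subst h
    · exact absurd (by decide) hnd
    all_goals decide
  have kg : g ∉ pvNodes := by
    simp [pvNodes, h1, h2, h3, h4]
  have hs : s ∈ pvNodes := by
    rcases hpre with h | h | h | h <;> subst h <;> decide
  unfold A_staric A_staric_alt
  rw [pvALoop_none g kg 12 _ _ _ (by intro x hx; simpa using (List.mem_singleton.mp hx) ▸ hs),
      pvBest_none g kg 5 s hs]
  rfl

theorem A_staric_changed : Claim_changed_A_staric := by
  unfold Claim_changed_A_staric; decide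

theorem A_staric_tight : Claim_exact_A_staric := by
  intro s g _ _ hd
  obtain ⟨hs, hg⟩ := hd
  subst hs
  rcases hg with hg | hg <;> subst hg <;> decide
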